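-- pv_equiv track=rewrite | github.com/Sajithrajan03/DataStructures-and-Algorithms | Backtracking/Fair_Partition.py | fair_partition
-- ===== SOURCE A (Python) =====
-- def fair_partition(arr, k):
--     def is_feasible(mid):
--         count = 1
--         current_sum = 0
--         partitioned_arr = [[]]
--
--         for num in arr:
--             if current_sum + num > mid:
--                 count += 1
--                 current_sum = 0
--                 partitioned_arr.append([])
--
--             current_sum += num
--             partitioned_arr[-1].append(num)
--
--         return count <= k, partitioned_arr
--
--     low, high = max(arr), sum(arr)
--
--     while low <= high:
--         mid = (low + high) // 2
--
--         feasible, partitioned_arr = is_feasible(mid)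
--
--         if feasible:
--             high = mid - 1
--         else:
--             low = mid + 1
--
--     return partitioned_arr
-- ===== SOURCE B (Python) =====
-- def fair_partition(arr, k):
--     # Recursive binary search over the threshold range; a probe computes only the
--     # list of cut indices (part start positions) of the greedy split at that
--     # threshold, and the search returns the cut list of its final probe.  The
--     # partition itself is materialized once at the end by slicing arr at the cuts.
--     def cut_points(limit):
--         cuts, total = [0], 0
--         for i, x in enumerate(arr):
--             if total + x > limit:
--                 cuts.append(i)
--                 total = 0
--             total += x
--         return cuts
--
--     def search(lo, hi):
--         mid = (lo + hi) // 2
--         cuts = cut_points(mid)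
--         if len(cuts) <= k:
--             return search(lo, mid - 1) if lo <= mid - 1 else cuts
--         else:
--             return search(mid + 1, hi) if mid + 1 <= hi else cuts
--
--     cuts = search(max(arr), sum(arr))
--     return [arr[i:j] for i, j in zip(cuts, cuts[1:] + [len(arr)])]
-- ===== Notes on version B (the rewrite author's own statement) =====
-- stated objective: alternative
-- what changed: Replaces the iterative while-loop that rebuilds a list-of-lists partition inside every feasibility probe with a recursive binary search whose probes compute only cut indices (part start positions); the partition is materialized once at the end by slicing arr at the final probe's cuts. Pre_ excludes the inputs where A raises: the empty list (max() ValueError) and arrays whose max exceeds their sum (the loop never runs and A's return hits an unbound variable).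
import Mathlib
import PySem

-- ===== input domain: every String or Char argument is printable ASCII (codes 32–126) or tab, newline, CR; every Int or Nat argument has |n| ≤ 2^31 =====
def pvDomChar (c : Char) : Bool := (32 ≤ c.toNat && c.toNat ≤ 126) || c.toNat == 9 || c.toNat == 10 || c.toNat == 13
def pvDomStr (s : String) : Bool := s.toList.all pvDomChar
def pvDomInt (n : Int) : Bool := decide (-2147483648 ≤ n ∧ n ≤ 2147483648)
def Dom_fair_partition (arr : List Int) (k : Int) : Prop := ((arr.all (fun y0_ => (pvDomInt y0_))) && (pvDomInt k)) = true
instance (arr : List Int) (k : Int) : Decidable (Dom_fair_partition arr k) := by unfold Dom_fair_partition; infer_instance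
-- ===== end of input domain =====

-- B replaces A's while loop (which rebuilds a list-of-lists partition in every feasibility
-- probe) by a recursive binary search whose probes compute only cut indices; the partition
-- is materialized once at the end by slicing.  Return value only; neither mutates arr.
-- Both ports drive the search by a fuel counter (the range shrinks every recursive step,
-- so the initial fuel is never exhausted); this only makes the same computation total.

-- ===== PORT A =====

-- partitioned_arr[-1].append(num)
def pvAppendLast (parts : List (List Int)) (num : Int) : List (List Int) :=
  match parts with
  | [] => []
  | [l] => [l ++ [num]]
  | l :: rest => l :: pvAppendLast rest num

-- A's is_feasible: fold carrying (count, current_sum, partitioned_arr)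
def pvFeasA (arr : List Int) (k mid : Int) : Bool × List (List Int) :=
  let s := arr.foldl
    (fun (st : Int × Int × List (List Int)) num =>
      let st := if st.2.1 + num > mid then (st.1 + 1, (0 : Int), st.2.2 ++ [[]]) else st
      (st.1, st.2.1 + num, pvAppendLast st.2.2 num))
    (1, 0, [[]])
  (decide (s.1 ≤ k), s.2.2)

-- A's while loop, carrying the last partitioned_arr (seeded with [], unreachable under Pre_)
def pvLoopA (arr : List Int) (k : Int) : Nat → Int → Int → List (List Int) → List (List Int)
  | 0, _, _, parts => parts
  | fuel + 1, low, high, parts =>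
    if low ≤ high then
      let mid := PySem.Int.floordiv (low + high) 2
      let fp := pvFeasA arr k mid
      if fp.1 then pvLoopA arr k fuel low (mid - 1) fp.2
      else pvLoopA arr k fuel (mid + 1) high fp.2
    else parts

-- low = max(arr) (Python max raises ValueError on []; here .getD 0, outside Pre_)
def fair_partition (arr : List Int) (k : Int) : List (List Int) :=
  let low := (PySem.List.max? arr (fun x => x)).getD 0
  let high := arr.sum
  pvLoopA arr k (high - low + 1).toNat low high []

-- ===== PORT B =====

-- B's cut_points: fold over enumerate(arr) carrying (cuts, total)
def pvCuts (arr : List Int) (limit : Int) : List Int :=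
  ((PySem.List.enumerate arr 0).foldl
    (fun (st : List Int × Int) ix =>
      let st := if st.2 + ix.2 > limit then (st.1 ++ [ix.1], (0 : Int)) else st
      (st.1, st.2 + ix.2))
    ([0], 0)).1

-- B's recursive search, returning the final probe's cut list
def pvSearch (arr : List Int) (k : Int) : Nat → Int → Int → List Int
  | 0, lo, hi => pvCuts arr (PySem.Int.floordiv (lo + hi) 2)
  | fuel + 1, lo, hi =>
    let mid := PySem.Int.floordiv (lo + hi) 2
    let cuts := pvCuts arr mid
    if (cuts.length : Int) ≤ k then
      if lo ≤ mid - 1 then pvSearch arr k fuel lo (mid - 1) else cuts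
    else
      if mid + 1 ≤ hi then pvSearch arr k fuel (mid + 1) hi else cuts

-- [arr[i:j] for i, j in zip(cuts, cuts[1:] + [len(arr)])]
def pvSlices (arr : List Int) (cuts : List Int) : List (List Int) :=
  (cuts.zip (cuts.tail ++ [(arr.length : Int)])).map
    (fun ij => PySem.List.slice arr (some ij.1) (some ij.2))

def fair_partition_alt (arr : List Int) (k : Int) : List (List Int) :=
  let low := (PySem.List.max? arr (fun x => x)).getD 0
  let high := arr.sum
  pvSlices arr (pvSearch arr k (high - low).toNat low high)

-- ===== PRECONDITION & SPEC =====
-- Pre_ excludes exactly the inputs where A raises: the empty list (max raises ValueError)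
-- and non-empty arr with max(arr) > sum(arr), where the while loop never runs and A's
-- return hits an unbound variable (UnboundLocalError); B returns a value there.
def Pre_fair_partition (arr : List Int) (k : Int) : Prop :=
  arr ≠ [] ∧ (PySem.List.max? arr (fun x => x)).getD 0 ≤ arr.sum
instance (arr : List Int) (k : Int) : Decidable (Pre_fair_partition arr k) := by
  unfold Pre_fair_partition; infer_instance

def pvWitness_fair_partition : List Int × Int := ([3, 1, 4, 1, 5], 3)

def Spec_fair_partition (arr : List Int) (k : Int) (out : List (List Int)) : Prop := out = fair_partition_alt arr k
instance (arr : List Int) (k : Int) (out : List (List Int)) : Decidable (Spec_fair_partition arr k out) := by unfold Spec_fair_partition; infer_instance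

-- ===== CLAIM (what is proved, stated in full; the proofs are below) =====
def Claim_equal_fair_partition : Prop := ∀ (arr : List Int) (k : Int), Dom_fair_partition arr k → Pre_fair_partition arr k → Spec_fair_partition arr k (fair_partition arr k)
-- ===== LEMMAS AND PROOFS =====

-- the two fold step functions, named for the lemmas
def pvStepA (mid : Int) (st : Int × Int × List (List Int)) (num : Int) : Int × Int × List (List Int) :=
  let st := if st.2.1 + num > mid then (st.1 + 1, (0 : Int), st.2.2 ++ [[]]) else st
  (st.1, st.2.1 + num, pvAppendLast st.2.2 num)

def pvStepB (limit : Int) (st : List Int × Int) (ix : Int × Int) : List Int × Int :=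
  let st := if st.2 + ix.2 > limit then (st.1 ++ [ix.1], (0 : Int)) else st
  (st.1, st.2 + ix.2)

-- recursive form of pvSlices, convenient for induction
def pvMS (arr : List Int) (p : Int) : List Int → List (List Int)
  | [] => []
  | [i] => [PySem.List.slice arr (some i) (some p)]
  | i :: j :: t => PySem.List.slice arr (some i) (some j) :: pvMS arr p (j :: t)

theorem pvSlices_eq_MS (arr : List Int) : ∀ cuts : List Int,
    pvSlices arr cuts = pvMS arr (arr.length : Int) cuts := by
  intro cuts
  induction cuts with
  | nil => rfl
  | cons i t ih =>
    cases t with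
    | nil => rfl
    | cons j t' =>
      simp only [pvSlices, List.tail_cons, List.cons_append, List.zip_cons_cons,
        List.map_cons, pvMS] at *
      exact congrArg _ ih

theorem pvAppendLast_cons_of_ne (h : List Int) (rest : List (List Int)) (x : Int)
    (hne : rest ≠ []) : pvAppendLast (h :: rest) x = h :: pvAppendLast rest x := by
  cases rest with
  | nil => exact absurd rfl hne
  | cons y ys => rfl

theorem pvSlice_extend (arr : List Int) (i p x : Int) (h0 : 0 ≤ i) (hip : i ≤ p)
    (hp : p.toNat < arr.length) (hx : arr[p.toNat] = x) :
    PySem.List.slice arr (some i) (some (p + 1)) =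
      PySem.List.slice arr (some i) (some p) ++ [x] := by
  rw [PySem.List.slice_toNat arr h0 (by omega), PySem.List.slice_toNat arr h0 (by omega)]
  have h1 : (p + 1).toNat - i.toNat = (p.toNat - i.toNat) + 1 := by omega
  rw [h1, List.take_succ]
  congr 1
  rw [List.getElem?_drop]
  have h2 : i.toNat + (p.toNat - i.toNat) = p.toNat := by omega
  rw [h2, List.getElem?_eq_getElem hp, hx]
  rfl

theorem pvSlice_single (arr : List Int) (p x : Int) (h0 : 0 ≤ p)
    (hp : p.toNat < arr.length) (hx : arr[p.toNat] = x) :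
    PySem.List.slice arr (some p) (some (p + 1)) = [x] := by
  rw [PySem.List.slice_toNat arr h0 (by omega)]
  have h1 : (p + 1).toNat - p.toNat = 1 := by omega
  rw [h1, List.drop_eq_getElem_cons hp, hx]
  rfl

theorem pvMS_ne_nil (arr : List Int) (p : Int) (cuts : List Int) (h : cuts ≠ []) :
    pvMS arr p cuts ≠ [] := by
  cases cuts with
  | nil => exact absurd rfl h
  | cons i t => cases t <;> simp [pvMS]

-- A-step without a split extends the last part: pvMS at boundary p grows to boundary p+1
theorem pvMS_extend (arr : List Int) (p x : Int) (hp0 : 0 ≤ p) (hp : p.toNat < arr.length)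
    (hx : arr[p.toNat] = x) :
    ∀ cuts : List Int, cuts ≠ [] → (∀ j ∈ cuts, 0 ≤ j ∧ j ≤ p) →
      pvAppendLast (pvMS arr p cuts) x = pvMS arr (p + 1) cuts := by
  intro cuts
  induction cuts with
  | nil => intro h; exact absurd rfl h
  | cons i t ih =>
    intro _ hb
    cases t with
    | nil =>
      have hi := hb i (by simp)
      simp only [pvMS, pvAppendLast]
      rw [pvSlice_extend arr i p x hi.1 hi.2 hp hx]
    | cons j t' =>
      simp only [pvMS]
      rw [pvAppendLast_cons_of_ne _ _ _ (pvMS_ne_nil arr p (j :: t') (by simp))]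
      rw [ih (by simp) (fun y hy => hb y (List.mem_cons_of_mem i hy))]

-- A-step with a split: close the last part at p and open a new one containing x
theorem pvMS_split (arr : List Int) (p x : Int) (hp0 : 0 ≤ p) (hp : p.toNat < arr.length)
    (hx : arr[p.toNat] = x) :
    ∀ cuts : List Int, cuts ≠ [] →
      pvAppendLast (pvMS arr p cuts ++ [[]]) x = pvMS arr (p + 1) (cuts ++ [p]) := by
  intro cuts
  induction cuts with
  | nil => intro h; exact absurd rfl h
  | cons i t ih =>
    intro _
    cases t with
    | nil =>
      simp only [pvMS, List.cons_append, List.nil_append, pvAppendLast]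
      rw [pvSlice_single arr p x hp0 hp hx]
    | cons j t' =>
      simp only [pvMS, List.cons_append]
      have h1 : pvMS arr p (j :: t') ++ [[]] ≠ [] := by simp
      rw [pvAppendLast_cons_of_ne _ _ _ h1, ih (by simp)]
      rfl

-- the central invariant: A's fold over the suffix, started from the state that B's cuts
-- describe, lands in the state described by B's fold over the enumerated suffix
theorem pvFoldAB (arr : List Int) (mid : Int) :
    ∀ (suf : List Int) (p : Nat), p ≤ arr.length → arr.drop p = suf →
      ∀ (cur : Int) (cuts : List Int), cuts ≠ [] → (∀ j ∈ cuts, 0 ≤ j ∧ j ≤ (p : Int)) →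
      suf.foldl (pvStepA mid) ((cuts.length : Int), cur, pvMS arr (p : Int) cuts) =
        ((((PySem.List.enumerate suf (p : Int)).foldl (pvStepB mid) (cuts, cur)).1.length : Int),
         ((PySem.List.enumerate suf (p : Int)).foldl (pvStepB mid) (cuts, cur)).2,
         pvMS arr (arr.length : Int)
           ((PySem.List.enumerate suf (p : Int)).foldl (pvStepB mid) (cuts, cur)).1) := by
  intro suf
  induction suf with
  | nil =>
    intro p hpn hdrop cur cuts hne hb
    have hp : p = arr.length := le_antisymm hpn (List.drop_eq_nil_iff.mp hdrop)
    subst hp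
    simp [PySem.List.enumerate_nil]
  | cons x t ih =>
    intro p hpn hdrop cur cuts hne hb
    have hplt : p < arr.length := by
      rcases Nat.lt_or_ge p arr.length with h | h
      · exact h
      · rw [List.drop_eq_nil_of_le h] at hdrop; exact absurd hdrop (by simp)
    have hcons := List.drop_eq_getElem_cons hplt
    rw [hdrop] at hcons
    have hx : arr[p] = x := by injection hcons with h1 h2; exact h1.symm
    have hdrop' : arr.drop (p + 1) = t := by injection hcons with h1 h2; exact h2.symm
    have hxN : arr[((p : Int)).toNat] = x := by simpa using hx
    have hpN : ((p : Int)).toNat < arr.length := by simpa using hplt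
    rw [PySem.List.enumerate_cons]
    simp only [List.foldl_cons]
    by_cases hc : cur + x > mid
    · have hA : pvStepA mid ((cuts.length : Int), cur, pvMS arr (p : Int) cuts) x =
          (((cuts ++ [(p : Int)]).length : Int), 0 + x,
            pvMS arr ((p : Int) + 1) (cuts ++ [(p : Int)])) := by
        simp only [pvStepA, if_pos hc]
        refine Prod.ext (by push_cast [List.length_append, List.length_cons, List.length_nil]; ring) (Prod.ext rfl ?_)
        exact pvMS_split arr (p : Int) x (by positivity) hpN hxN cuts hne
      have hB : pvStepB mid (cuts, cur) ((p : Int), x) = (cuts ++ [(p : Int)], 0 + x) := by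
        simp only [pvStepB, if_pos hc]
      rw [hA, hB]
      have hcast : ((p : Int) + 1) = (((p + 1 : Nat)) : Int) := by push_cast; ring
      rw [hcast]
      exact ih (p + 1) (by omega) hdrop' (0 + x) (cuts ++ [(p : Int)]) (by simp)
        (by intro j hj
            rcases List.mem_append.mp hj with h | h
            · exact ⟨(hb j h).1, by have := (hb j h).2; push_cast; omega⟩
            · simp only [List.mem_singleton] at h
              subst h
              exact ⟨by positivity, by push_cast; omega⟩)
    · have hA : pvStepA mid ((cuts.length : Int), cur, pvMS arr (p : Int) cuts) x =
          ((cuts.length : Int), cur + x, pvMS arr ((p : Int) + 1) cuts) := by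
        simp only [pvStepA, if_neg hc]
        refine Prod.ext rfl (Prod.ext rfl ?_)
        exact pvMS_extend arr (p : Int) x (by positivity) hpN hxN cuts hne hb
      have hB : pvStepB mid (cuts, cur) ((p : Int), x) = (cuts, cur + x) := by
        simp only [pvStepB, if_neg hc]
      rw [hA, hB]
      have hcast : ((p : Int) + 1) = (((p + 1 : Nat)) : Int) := by push_cast; ring
      rw [hcast]
      exact ih (p + 1) (by omega) hdrop' (cur + x) cuts hne
        (fun j hj => ⟨(hb j hj).1, by have := (hb j hj).2; push_cast; omega⟩)

-- A's probe at mid computes B's cut list: the count is its length, the partition its slicing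
theorem pvFeasA_eq (arr : List Int) (k mid : Int) :
    pvFeasA arr k mid =
      (decide (((pvCuts arr mid).length : Int) ≤ k), pvSlices arr (pvCuts arr mid)) := by
  have h0 : pvMS arr ((0 : Nat) : Int) [0] = [[]] := by
    simp only [Nat.cast_zero, pvMS]
    rw [PySem.List.slice_toNat arr le_rfl le_rfl]
    simp
  have key := pvFoldAB arr mid arr 0 (Nat.zero_le _) rfl 0 [0] (by simp)
    (by intro j hj; simp at hj; subst hj; exact ⟨le_rfl, le_rfl⟩)
  rw [h0] at key
  show (decide ((arr.foldl (pvStepA mid) (1, 0, [[]])).1 ≤ k),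
        (arr.foldl (pvStepA mid) (1, 0, [[]])).2.2) = _
  have h1 : ((([(0 : Int)]).length : Int)) = (1 : Int) := by simp
  rw [show ((1 : Int), (0 : Int), ([[]] : List (List Int))) =
        ((([(0 : Int)]).length : Int), (0 : Int), ([[]] : List (List Int))) by simp]
  rw [key]
  rw [pvSlices_eq_MS]
  rfl

-- loop/recursion correspondence: A's loop returns the slicing of B's final probe's cuts
theorem pvLoop_eq (arr : List Int) (k : Int) :
    ∀ (fuel : Nat) (lo hi : Int) (parts0 : List (List Int)), lo ≤ hi →
      pvLoopA arr k (fuel + 1) lo hi parts0 =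
        pvSlices arr (pvSearch arr k fuel lo hi) := by
  intro fuel
  induction fuel with
  | zero =>
    intro lo hi parts0 h
    rw [pvLoopA, if_pos h, pvSearch]
    simp only [pvFeasA_eq]
    by_cases hf : ((pvCuts arr (PySem.Int.floordiv (lo + hi) 2)).length : Int) ≤ k
    · rw [if_pos (decide_eq_true hf)]; rfl
    · rw [if_neg (fun hd => hf (of_decide_eq_true hd))]; rfl
  | succ f ihf =>
    intro lo hi parts0 h
    rw [pvLoopA, if_pos h, pvSearch]
    simp only [pvFeasA_eq]
    set mid := PySem.Int.floordiv (lo + hi) 2 with hmid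
    by_cases hf : ((pvCuts arr mid).length : Int) ≤ k
    · rw [if_pos hf, if_pos (decide_eq_true hf)]
      by_cases h2 : lo ≤ mid - 1
      · rw [if_pos h2]
        exact ihf lo (mid - 1) _ h2
      · rw [if_neg h2, pvLoopA, if_neg h2]
    · rw [if_neg hf, if_neg (fun hd => hf (of_decide_eq_true hd))]
      by_cases h2 : mid + 1 ≤ hi
      · rw [if_pos h2]
        exact ihf (mid + 1) hi _ h2
      · rw [if_neg h2, pvLoopA, if_neg h2]

-- ===== VERDICT (by name: the statement is the Claim_ definition above) =====
theorem fair_partition_spec : Claim_equal_fair_partition := by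
  intro arr k _ hpre
  unfold Spec_fair_partition
  simp only [fair_partition, fair_partition_alt]
  have h : (PySem.List.max? arr (fun x => x)).getD 0 ≤ arr.sum := hpre.2
  have hf : (arr.sum - (PySem.List.max? arr (fun x => x)).getD 0 + 1).toNat =
      (arr.sum - (PySem.List.max? arr (fun x => x)).getD 0).toNat + 1 := by omega
  rw [hf]
  exact pvLoop_eq arr k _ _ _ _ h
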